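-- pv_equiv track=rewrite | github.com/shohruzbekcoder007/chatbotwithui | tools_llm/soato/soato_tool.py | _extract_search_term
-- ===== SOURCE A (Python) =====
-- def _extract_search_term(query: str) -> str:
--     """So'rovni tozalash va asosiy qidiruv so'zini ajratib olish"""
--     # So'rovni tozalash
--     query = query.strip()
--     query = query.replace("soato", "").replace("mhobit", "")
--     query = query.replace("kodi", "").replace("code", "")
--     query = query.strip()
--
--     # Asosiy qidiruv so'zini ajratib olish
--     search_term = ""
--     words = query.split()
--     for word in words:
--         if len(word) >= 3:  # Qidiruv so'zi kamida 3 ta belgidan iborat bo'lishi kerak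
--             search_term = word
--             break
--
--     return search_term
-- ===== SOURCE B (Python) =====
-- def _extract_search_term(query: str) -> str:
--     """Same cleaning, then a single character scan instead of split+loop."""
--     query = query.strip()
--     query = query.replace("soato", "").replace("mhobit", "")
--     query = query.replace("kodi", "").replace("code", "")
--     query = query.strip()
--
--     cur = []
--     for ch in query:
--         if ch.isspace():
--             if len(cur) >= 3:
--                 return ''.join(cur)
--             cur = []
--         else:
--             cur.append(ch)
--     return ''.join(cur) if len(cur) >= 3 else ''
-- ===== Notes on version B (the rewrite author's own statement) =====
-- stated objective: alternative
-- what changed: After the identical cleaning, B finds the first token of length>=3 by a single character scan with a running buffer (early return), instead of building the full split() word list and looping over it.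
import Mathlib
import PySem

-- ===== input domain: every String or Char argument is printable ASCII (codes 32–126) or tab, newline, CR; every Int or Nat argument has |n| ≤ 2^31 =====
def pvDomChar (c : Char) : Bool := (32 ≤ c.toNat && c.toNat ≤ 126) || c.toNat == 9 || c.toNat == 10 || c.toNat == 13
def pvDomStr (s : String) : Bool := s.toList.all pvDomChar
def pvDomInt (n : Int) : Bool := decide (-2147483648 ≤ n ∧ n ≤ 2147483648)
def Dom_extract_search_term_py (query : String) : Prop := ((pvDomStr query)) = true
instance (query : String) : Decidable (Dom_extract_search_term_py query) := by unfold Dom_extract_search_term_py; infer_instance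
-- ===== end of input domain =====

-- B changes only the extraction step: a one-pass character scan instead of split()+loop (alternative structure, same cost).

-- ===== PORT A =====
-- the 'for word in words: if len(word) >= 3: search_term = word; break' loop
def pvALoop : List String → String
  | [] => ""
  | w :: ws => if 3 ≤ PySem.Str.len w then w else pvALoop ws

def extract_search_term_py (query : String) : String :=
  let q1 := PySem.Str.strip query
  let q2 := PySem.Str.replace (PySem.Str.replace q1 "soato" "") "mhobit" ""
  let q3 := PySem.Str.replace (PySem.Str.replace q2 "kodi" "") "code" ""
  let q4 := PySem.Str.strip q3
  pvALoop (PySem.Str.split₀ q4)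

-- ===== PORT B =====
-- the single scan: cur is the current run of non-space chars; return early on a run of length >= 3
def pvBScan : List Char → List Char → String
  | [], cur => if 3 ≤ cur.length then String.ofList cur else ""
  | c :: rest, cur =>
      if PySem.Chars.isspace c then
        (if 3 ≤ cur.length then String.ofList cur else pvBScan rest [])
      else pvBScan rest (cur ++ [c])

def extract_search_term_py_alt (query : String) : String :=
  let q1 := PySem.Str.strip query
  let q2 := PySem.Str.replace (PySem.Str.replace q1 "soato" "") "mhobit" ""
  let q3 := PySem.Str.replace (PySem.Str.replace q2 "kodi" "") "code" ""
  let q4 := PySem.Str.strip q3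
  pvBScan q4.toList []

-- ===== PRECONDITION & SPEC =====
def Spec_extract_search_term_py (query : String) (out : String) : Prop := out = extract_search_term_py_alt query
instance (query : String) (out : String) : Decidable (Spec_extract_search_term_py query out) := by unfold Spec_extract_search_term_py; infer_instance

-- ===== CLAIM (what is proved, stated in full; the proofs are below) =====
def Claim_equal_extract_search_term_py : Prop := ∀ (query : String), Dom_extract_search_term_py query → Spec_extract_search_term_py query (extract_search_term_py query)

-- ===== LEMMAS AND PROOFS =====

-- list-level "first word with length ≥ 3, else []"
def pvFw : List (List Char) → List Char
  | [] => []
  | w :: ws => if 3 ≤ w.length then w else pvFw ws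

theorem pvALoop_eq_fw (ws : List String) :
    pvALoop ws = String.ofList (pvFw (ws.map String.toList)) := by
  induction ws with
  | nil => rfl
  | cons w ws ih =>
      simp only [pvALoop, pvFw, List.map, PySem.Str.len]
      by_cases h : 3 ≤ w.toList.length
      · rw [if_pos (show (3:Int) ≤ (w.toList.length : Int) by exact_mod_cast h), if_pos h,
          String.ofList_toList]
      · rw [if_neg (show ¬ (3:Int) ≤ (w.toList.length : Int) by exact_mod_cast h), if_neg h]
        exact ih

theorem pvGo_acc (cs : List Char) (cur : List Char) (acc : List (List Char)) :
    PySem.Chars.split₀.go cs cur acc = acc.reverse ++ PySem.Chars.split₀.go cs cur [] := by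
  induction cs generalizing cur acc with
  | nil =>
      simp only [PySem.Chars.split₀.go]
      split_ifs <;> simp
  | cons c rest ih =>
      simp only [PySem.Chars.split₀.go]
      split_ifs with h1 h2
      · exact ih [] acc
      · rw [ih [] (cur.reverse :: acc), ih [] [cur.reverse]]
        simp
      · exact ih (c :: cur) acc

theorem pvScan_eq (cs : List Char) (cur : List Char) :
    pvBScan cs cur = String.ofList (pvFw (PySem.Chars.split₀.go cs cur.reverse [])) := by
  induction cs generalizing cur with
  | nil =>
      by_cases hc : cur = []
      · subst hc; rfl
      · have hne : cur.reverse.isEmpty = false := by simp [hc]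
        simp only [pvBScan, PySem.Chars.split₀.go, hne, Bool.false_eq_true, if_false,
          List.reverse_reverse, List.reverse_cons, List.reverse_nil, List.nil_append, pvFw]
        split_ifs with h
        · rfl
        · rfl
  | cons c rest ih =>
      by_cases hs : PySem.Chars.isspace c = true
      · by_cases hc : cur = []
        · subst hc
          simp only [pvBScan, PySem.Chars.split₀.go, hs, if_true, List.reverse_nil,
            List.isEmpty_nil, List.length_nil]
          rw [if_neg (by omega)]
          simpa using ih []
        · have hne : cur.reverse.isEmpty = false := by simp [hc]
          simp only [pvBScan, PySem.Chars.split₀.go, hs, if_true, hne, Bool.false_eq_true,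
            if_false, List.reverse_reverse]
          rw [pvGo_acc rest [] [cur]]
          simp only [List.reverse_cons, List.reverse_nil, List.nil_append,
            List.singleton_append, pvFw]
          split_ifs with h
          · rfl
          · simpa using ih []
      · simp only [pvBScan, PySem.Chars.split₀.go, if_neg hs]
        rw [ih (cur ++ [c])]
        simp

-- ===== VERDICT (by name: the statement is the Claim_ definition above) =====
theorem extract_search_term_py_spec : Claim_equal_extract_search_term_py := by
  intro query _
  unfold Spec_extract_search_term_py extract_search_term_py extract_search_term_py_alt
  rw [pvALoop_eq_fw, pvScan_eq]
  have h := PySem.Str.split₀_map_toList (PySem.Str.strip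
    (PySem.Str.replace (PySem.Str.replace
      (PySem.Str.replace (PySem.Str.replace (PySem.Str.strip query) "soato" "") "mhobit" "")
      "kodi" "") "code" ""))
  simp only [List.reverse_nil]
  rw [h]
  rfl
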